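-- pv_equiv track=rewrite | github.com/michelle-madrid/amsa-weekly-report | core/extractores.py | extraer_planta
-- ===== SOURCE A (Python) =====
-- def extraer_planta(texto):
--     seccion = []
--     capturar = False
--     for linea in texto.split("\n"):
--         linea_limpia = linea.strip()
--         if linea_limpia.startswith("Planta:") or linea_limpia.startswith("Planta"):
--             capturar = True
--             continue
--         if capturar:
--             seccion.append(linea_limpia)
--     return seccion
-- ===== SOURCE B (Python) =====
-- def extraer_planta(texto):
--     stripped = [linea.strip() for linea in texto.split("\n")]
--     for i, linea in enumerate(stripped):
--         if linea.startswith("Planta"):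
--             return [l for l in stripped[i + 1:] if not l.startswith("Planta")]
--     return []
-- ===== Notes on version B (the rewrite author's own statement) =====
-- stated objective: alternative
-- what changed: Replaced A's single-pass loop with a boolean capture flag by a two-phase structure: strip all lines once, locate the first 'Planta' header line, then filter later 'Planta' lines out of the tail.
import Mathlib
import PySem

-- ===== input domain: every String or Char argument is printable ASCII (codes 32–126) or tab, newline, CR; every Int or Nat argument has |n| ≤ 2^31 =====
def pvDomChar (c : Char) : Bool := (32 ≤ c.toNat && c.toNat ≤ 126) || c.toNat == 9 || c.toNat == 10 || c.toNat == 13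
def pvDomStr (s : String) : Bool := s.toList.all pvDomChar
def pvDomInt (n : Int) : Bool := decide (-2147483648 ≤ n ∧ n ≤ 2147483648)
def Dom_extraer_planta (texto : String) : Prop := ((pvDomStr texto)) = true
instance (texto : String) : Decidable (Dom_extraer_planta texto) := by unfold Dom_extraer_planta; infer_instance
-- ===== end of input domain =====

-- B replaces A's single-pass boolean capture flag by a two-phase structure (strip all lines,
-- locate the first 'Planta' header, filter the tail); same value, alternative decomposition.

-- ===== PORT A =====
-- s.split("\n"): PySem.Str.split? is none only for an empty separator, never here, so getD [] is exact.
def extraer_planta (texto : String) : List String :=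
  (((PySem.Str.split? texto "\n").getD []).foldl
    (fun (st : List String × Bool) linea =>
      let linea_limpia := PySem.Str.strip linea
      if PySem.Str.startswith linea_limpia "Planta:" || PySem.Str.startswith linea_limpia "Planta" then
        (st.1, true)
      else if st.2 then (st.1 ++ [linea_limpia], st.2)
      else st)
    ([], false)).1

-- ===== PORT B =====
def extraer_planta_alt (texto : String) : List String :=
  let stripped := ((PySem.Str.split? texto "\n").getD []).map PySem.Str.strip
  match stripped.findIdx? (fun l => PySem.Str.startswith l "Planta") with
  | none => []
  | some i => (stripped.drop (i + 1)).filter (fun l => !PySem.Str.startswith l "Planta")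

-- ===== PRECONDITION & SPEC =====
def Spec_extraer_planta (texto : String) (out : List String) : Prop := out = extraer_planta_alt texto
instance (texto : String) (out : List String) : Decidable (Spec_extraer_planta texto out) := by unfold Spec_extraer_planta; infer_instance

-- ===== CLAIM (what is proved, stated in full; the proofs are below) =====
def Claim_equal_extraer_planta : Prop := ∀ (texto : String), Dom_extraer_planta texto → Spec_extraer_planta texto (extraer_planta texto)

-- ===== LEMMAS AND PROOFS =====

-- A's header test ('Planta:' or 'Planta') is just the 'Planta' test
theorem pv_header_test (l : String) :
    (PySem.Str.startswith l "Planta:" || PySem.Str.startswith l "Planta")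
      = PySem.Str.startswith l "Planta" := by
  cases h : PySem.Str.startswith l "Planta:" with
  | false => simp
  | true =>
    simp only [Bool.true_or]
    symm
    simp only [PySem.Str.startswith_eq] at h ⊢
    rw [PySem.Chars.startswith_iff] at h ⊢
    exact List.IsPrefix.trans (by decide) h

-- recursive description of A's loop over the already-stripped lines, for an abstract header test Q
def pvLoop (Q : String → Bool) : Bool → List String → List String
  | _, [] => []
  | cap, l :: ls =>
    if Q l then pvLoop Q true ls
    else if cap then l :: pvLoop Q cap ls
    else pvLoop Q cap ls

theorem pvLoop_foldl_map (Q : String → Bool) (g : String → String)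
    (ls acc : List String) (cap : Bool) :
    (ls.foldl
      (fun (st : List String × Bool) l =>
        if Q (g l) then (st.1, true)
        else if st.2 then (st.1 ++ [g l], st.2)
        else st)
      (acc, cap)).1 = acc ++ pvLoop Q cap (ls.map g) := by
  induction ls generalizing acc cap with
  | nil => simp [pvLoop]
  | cons l ls ih =>
    simp only [List.foldl_cons, List.map_cons, pvLoop]
    cases hq : Q (g l) with
    | true => simp [ih]
    | false => cases cap <;> simp [ih]

theorem pvLoop_true (Q : String → Bool) (ls : List String) :
    pvLoop Q true ls = ls.filter (fun l => !Q l) := by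
  induction ls with
  | nil => rfl
  | cons l ls ih =>
    simp only [pvLoop, List.filter_cons]
    cases hq : Q l <;> simp [ih]

theorem pvLoop_false (Q : String → Bool) (ls : List String) :
    pvLoop Q false ls =
      match ls.findIdx? Q with
      | none => []
      | some i => (ls.drop (i + 1)).filter (fun l => !Q l) := by
  induction ls with
  | nil => rfl
  | cons l ls ih =>
    simp only [pvLoop, List.findIdx?_cons]
    cases hq : Q l with
    | true => simp [pvLoop_true]
    | false =>
      simp only [Bool.false_eq_true, if_false, ih]
      cases hf : ls.findIdx? Q <;> simp

-- ===== VERDICT (by name: the statement is the Claim_ definition above) =====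
theorem extraer_planta_spec : Claim_equal_extraer_planta := by
  intro texto _
  unfold Spec_extraer_planta extraer_planta extraer_planta_alt
  have hfun :
      (fun (st : List String × Bool) linea =>
        let linea_limpia := PySem.Str.strip linea
        if PySem.Str.startswith linea_limpia "Planta:" || PySem.Str.startswith linea_limpia "Planta" then
          (st.1, true)
        else if st.2 then (st.1 ++ [linea_limpia], st.2)
        else st)
      = (fun (st : List String × Bool) l =>
          if (fun l => PySem.Str.startswith l "Planta") (PySem.Str.strip l) then (st.1, true)
          else if st.2 then (st.1 ++ [PySem.Str.strip l], st.2)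
          else st) := by
    funext st linea
    simp only [pv_header_test]
  rw [hfun,
      pvLoop_foldl_map (fun l => PySem.Str.startswith l "Planta") PySem.Str.strip,
      List.nil_append,
      pvLoop_false (fun l => PySem.Str.startswith l "Planta")]
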